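-- pv_equiv track=rewrite | github.com/luxurahair/luxura-inventory-api | scripts/fix_genius_skus_wix.py | extract_color_from_handle
-- ===== SOURCE A (Python) =====
-- from typing import Dict, List, Optional, Tuple
--
-- COLOR_LUXE_MAP = {
--     # Noirs
--     "1": "ONYX-NOIR",
--     "1b": "NOIR-SOIE",
--     # Bruns
--     "2": "ESPRESSO-INTENSE",
--     "db": "NUIT-MYSTERE",
--     "dc": "CHOCOLAT-PROFOND",
--     "cacao": "CACAO-VELOURS",
--     "chengtu": "SOIE-ORIENT",
--     "foochow": "CACHEMIRE-ORIENTAL",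
--     # Châtaignes
--     "3": "CHATAIGNE-DOUCE",
--     "cinnamon": "CANNELLE-EPICEE",
--     "3-3t24": "CHATAIGNE-LUMIERE",
--     # Caramels
--     "6": "CARAMEL-DORE",
--     "bm": "MIEL-SAUVAGE",
--     "6-24": "GOLDEN-HOUR",
--     "6-6t24": "CARAMEL-SOLEIL",
--     # Blonds
--     "18-22": "CHAMPAGNE-DORE",
--     "60a": "PLATINE-PUR",
--     "pha": "CENDRE-CELESTE",
--     "613-18a": "DIAMANT-GLACE",
--     # Blancs
--     "ivory": "IVOIRE-PRECIEUX",
--     "icw": "CRISTAL-POLAIRE",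
--     # Ombrés
--     "cb": "MIEL-SAUVAGE-OMBRE",
--     "hps": "CENDRE-ETOILE",
--     "5at60": "AURORE-GLACIALE",
--     "5atp18b62": "AURORE-BOREALE",
--     "2btp18-1006": "ESPRESSO-LUMIERE",
--     "t14-p14-24": "VENISE-DOREE",
-- }
--
-- def extract_color_from_handle(handle: str) -> Optional[str]:
--     """
--     Extrait le code couleur depuis le handle Wix.
--     Ex: "genius-trame-invisible-série-vivian-dark-chocolate-dc" → "dc"
--     """
--     if not handle:
--         return None
--
--     handle_lower = handle.lower()
--
--     # Chercher le code couleur à la fin du handle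
--     for code in sorted(COLOR_LUXE_MAP.keys(), key=len, reverse=True):
--         if handle_lower.endswith(f"-{code}"):
--             return code
--
--     return None
-- ===== SOURCE B (Python) =====
-- from typing import Dict, List, Optional, Tuple
--
-- COLOR_LUXE_MAP = {
--     "1": "ONYX-NOIR",
--     "1b": "NOIR-SOIE",
--     "2": "ESPRESSO-INTENSE",
--     "db": "NUIT-MYSTERE",
--     "dc": "CHOCOLAT-PROFOND",
--     "cacao": "CACAO-VELOURS",
--     "chengtu": "SOIE-ORIENT",
--     "foochow": "CACHEMIRE-ORIENTAL",
--     "3": "CHATAIGNE-DOUCE",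
--     "cinnamon": "CANNELLE-EPICEE",
--     "3-3t24": "CHATAIGNE-LUMIERE",
--     "6": "CARAMEL-DORE",
--     "bm": "MIEL-SAUVAGE",
--     "6-24": "GOLDEN-HOUR",
--     "6-6t24": "CARAMEL-SOLEIL",
--     "18-22": "CHAMPAGNE-DORE",
--     "60a": "PLATINE-PUR",
--     "pha": "CENDRE-CELESTE",
--     "613-18a": "DIAMANT-GLACE",
--     "ivory": "IVOIRE-PRECIEUX",
--     "icw": "CRISTAL-POLAIRE",
--     "cb": "MIEL-SAUVAGE-OMBRE",
--     "hps": "CENDRE-ETOILE",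
--     "5at60": "AURORE-GLACIALE",
--     "5atp18b62": "AURORE-BOREALE",
--     "2btp18-1006": "ESPRESSO-LUMIERE",
--     "t14-p14-24": "VENISE-DOREE",
-- }
--
-- def extract_color_from_handle(handle):
--     # Scan the handle's hyphens left-to-right: the first hyphen whose tail is a
--     # known code gives the longest matching code, so it is the answer.
--     hl = handle.lower()
--     for i, ch in enumerate(hl):
--         if ch == '-':
--             cand = hl[i + 1:]
--             if cand in COLOR_LUXE_MAP:
--                 return cand
--     return None
-- ===== Notes on version B (the rewrite author's own statement) =====
-- stated objective: alternative
-- what changed: B iterates over the handle's hyphen positions left-to-right and returns the first tail that is a key of COLOR_LUXE_MAP (longest suffix tried first), instead of A's loop over all 27 map keys sorted by length testing endswith.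
import Mathlib
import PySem

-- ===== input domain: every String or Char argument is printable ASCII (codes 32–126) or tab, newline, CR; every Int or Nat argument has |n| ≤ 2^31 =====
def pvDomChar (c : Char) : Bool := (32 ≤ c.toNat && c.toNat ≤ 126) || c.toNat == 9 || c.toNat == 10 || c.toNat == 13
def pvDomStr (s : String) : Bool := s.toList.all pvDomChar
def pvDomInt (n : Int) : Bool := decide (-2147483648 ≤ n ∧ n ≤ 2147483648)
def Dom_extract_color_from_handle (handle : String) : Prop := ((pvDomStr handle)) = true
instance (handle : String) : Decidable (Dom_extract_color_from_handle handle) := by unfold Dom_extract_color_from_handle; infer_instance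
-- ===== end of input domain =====

-- B scans the handle's hyphen positions left-to-right (longest suffix first) with a
-- key-set lookup, instead of A's loop over all map keys sorted by length with endswith.


-- ===== PORT A =====
-- keys of COLOR_LUXE_MAP, in dict insertion order
def pvKeys : List String :=
  ["1", "1b", "2", "db", "dc", "cacao", "chengtu", "foochow", "3", "cinnamon",
   "3-3t24", "6", "bm", "6-24", "6-6t24", "18-22", "60a", "pha", "613-18a",
   "ivory", "icw", "cb", "hps", "5at60", "5atp18b62", "2btp18-1006", "t14-p14-24"]

-- sorted(COLOR_LUXE_MAP.keys(), key=len, reverse=True)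
def pvSortedKeys : List String := PySem.List.sorted pvKeys (fun s => PySem.Str.len s) true

-- the for-loop over the sorted keys: first code with handle_lower.endswith("-" + code)
def pvLoopA (hl : String) : List String → Option String
  | [] => none
  | k :: ks => if PySem.Str.endswith hl ("-" ++ k) then some k else pvLoopA hl ks

def extract_color_from_handle (handle : String) : Option String :=
  if handle = "" then none
  else pvLoopA (PySem.Str.lower handle) pvSortedKeys

-- ===== PORT B =====
-- the enumerate loop over hl: at each '-' at index i, test hl[i+1:] for membership;
-- transcribed as structural recursion on the character list (the tail IS hl[i+1:])
def pvScanB : List Char → Option String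
  | [] => none
  | c :: rest =>
    if c = '-' then
      if pvKeys.contains (String.ofList rest) then some (String.ofList rest) else pvScanB rest
    else pvScanB rest

def extract_color_from_handle_alt (handle : String) : Option String :=
  pvScanB (PySem.Str.lower handle).toList

-- ===== PRECONDITION & SPEC =====
def Spec_extract_color_from_handle (handle : String) (out : Option String) : Prop := out = extract_color_from_handle_alt handle
instance (handle : String) (out : Option String) : Decidable (Spec_extract_color_from_handle handle out) := by unfold Spec_extract_color_from_handle; infer_instance

-- ===== CLAIM (what is proved, stated in full; the proofs are below) =====
def Claim_equal_extract_color_from_handle : Prop := ∀ (handle : String), Dom_extract_color_from_handle handle → Spec_extract_color_from_handle handle (extract_color_from_handle handle)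

-- ===== LEMMAS AND PROOFS =====

-- find? only depends on the predicate's values at the list's members
theorem pvFind?_congr {α : Type} (p q : α → Bool) : ∀ (l : List α), (∀ x ∈ l, p x = q x) → l.find? p = l.find? q
  | [], _ => rfl
  | a :: l, h => by
    rw [List.find?_cons, List.find?_cons, h a List.mem_cons_self]
    split <;> [rfl; exact pvFind?_congr p q l (fun x hx => h x (List.mem_cons_of_mem a hx))]

-- A's loop is find? over the key list
lemma pvLoopA_eq_find? (hl : String) (ks : List String) :
    pvLoopA hl ks = ks.find? (fun k => PySem.Str.endswith hl ("-" ++ k)) := by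
  induction ks with
  | nil => rfl
  | cons k ks ih =>
    simp [pvLoopA, List.find?, ih]; split_ifs <;> simp_all

lemma pvPred_eq (hl : String) (k : String) :
    PySem.Str.endswith hl ("-" ++ k) = PySem.Chars.endswith hl.toList ('-' :: k.toList) := by
  simp [PySem.Str.endswith_eq]

lemma pvMem_sortedKeys (s : String) : s ∈ pvSortedKeys ↔ s ∈ pvKeys := by
  simp [pvSortedKeys, PySem.List.mem_sorted]

-- first matching key in a length-descending key list, when the whole tail is itself a key
lemma pvFind_some (rest : List Char) :
    ∀ ks : List String, ks.Pairwise (fun a b => PySem.Str.len b ≤ PySem.Str.len a) →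
      String.ofList rest ∈ ks →
      ks.find? (fun k => PySem.Chars.endswith ('-' :: rest) ('-' :: k.toList)) = some (String.ofList rest)
  | [], _, hmem => by simp at hmem
  | k :: ks, hp, hmem => by
    rw [List.find?_cons]
    by_cases hk : k = String.ofList rest
    · subst hk
      have hself : PySem.Chars.endswith ('-' :: rest) ('-' :: rest) = true :=
        (PySem.Chars.endswith_iff _ _).mpr List.suffix_rfl
      simp only [String.toList_ofList, hself]
    · have hmem' : String.ofList rest ∈ ks := by
        rcases List.mem_cons.mp hmem with h | h
        · exact absurd h.symm hk
        · exact h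
      have hlen : PySem.Str.len (String.ofList rest) ≤ PySem.Str.len k :=
        (List.pairwise_cons.mp hp).1 _ hmem'
      have hpred : PySem.Chars.endswith ('-' :: rest) ('-' :: k.toList) = false := by
        rw [Bool.eq_false_iff]
        intro hc
        have hsuf : ('-' :: k.toList) <:+ ('-' :: rest) := (PySem.Chars.endswith_iff _ _).mp hc
        have hle : ('-' :: rest).length ≤ ('-' :: k.toList).length := by
          have := hsuf.length_le
          simp only [PySem.Str.len_eq, String.toList_ofList] at hlen
          simp at this hlen ⊢
          omega
        have heq := hsuf.eq_of_length_le hle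
        injection heq with _ hkl
        exact hk (String.ofList_eq.mpr hkl.symm).symm
      simp only [hpred]
      exact pvFind_some rest ks (List.pairwise_cons.mp hp).2 hmem'

-- when the head is not hyphen-plus-a-key, the predicate ignores the head character
lemma pvFind_step (c : Char) (rest : List Char)
    (h : ¬ (c = '-' ∧ String.ofList rest ∈ pvKeys)) :
    pvSortedKeys.find? (fun k => PySem.Chars.endswith (c :: rest) ('-' :: k.toList)) =
    pvSortedKeys.find? (fun k => PySem.Chars.endswith rest ('-' :: k.toList)) := by
  apply pvFind?_congr
  intro k hkmem
  apply Bool.eq_iff_iff.mpr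
  rw [PySem.Chars.endswith_iff, PySem.Chars.endswith_iff, List.suffix_cons_iff]
  constructor
  · rintro (heq | hsuf)
    · exfalso
      injection heq with hc hkl
      exact h ⟨hc.symm, by
        rw [String.ofList_eq.mpr hkl.symm]
        exact (pvMem_sortedKeys k).mp hkmem⟩
    · exact hsuf
  · exact Or.inr

lemma pvMain : ∀ L : List Char,
    pvSortedKeys.find? (fun k => PySem.Chars.endswith L ('-' :: k.toList)) = pvScanB L
  | [] => by
    rw [List.find?_eq_none.mpr, pvScanB]
    intro k _
    simp [PySem.Chars.endswith_iff]
  | c :: rest => by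
    by_cases h : c = '-' ∧ String.ofList rest ∈ pvKeys
    · obtain ⟨hc, hm⟩ := h
      subst hc
      rw [pvFind_some rest pvSortedKeys
            (PySem.List.sorted_pairwise_rev pvKeys (fun s => PySem.Str.len s))
            ((pvMem_sortedKeys _).mpr hm)]
      simp [pvScanB, hm]
    · rw [pvFind_step c rest h, pvMain rest]
      rw [pvScanB]
      rw [not_and] at h
      split_ifs with h1 h2
      · exact absurd (List.contains_iff_mem.mp h2) (h h1)
      · rfl
      · rfl

-- ===== VERDICT (by name: the statement is the Claim_ definition above) =====
theorem extract_color_from_handle_spec : Claim_equal_extract_color_from_handle := by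
  intro handle _
  unfold Spec_extract_color_from_handle extract_color_from_handle extract_color_from_handle_alt
  split_ifs with h
  · subst h
    simp [PySem.Str.toList_lower, PySem.Chars.lower, pvScanB]
  · rw [pvLoopA_eq_find?]
    simp only [pvPred_eq]
    exact pvMain _
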